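-- pv_equiv track=rewrite | github.com/OmarMed21/HandWashDetection | utiles.py | is_valid_car_num
-- ===== SOURCE A (Python) =====
-- def is_valid_car_num(car_num:str):
--     splited_car_num = ["",""]
--     for char in car_num:
--         if char.isdigit():
--             splited_car_num[0] += char
--         else:
--             splited_car_num[1] +=char
--     num_len  = len(splited_car_num[0])
--     char_len = len(splited_car_num[1])
--     if car_num[:num_len] != splited_car_num[0]:
--         return False
--
--     if num_len > 4:
--         return False
--
--     if char_len > 3:
--         return False
--
--     if char_len < 1 or num_len < 1:
--         return False
--
--     return True
-- ===== SOURCE B (Python) =====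
-- def is_valid_car_num(car_num: str):
--     i = 0
--     while i < len(car_num) and car_num[i].isdigit():
--         i += 1
--     rest = car_num[i:]
--     return (1 <= i <= 4
--             and 1 <= len(rest) <= 3
--             and not any(c.isdigit() for c in rest))
-- ===== Notes on version B (the rewrite author's own statement) =====
-- stated objective: faster
-- what changed: Replaces A's two-bucket partition (built by quadratic string concatenation) plus prefix-slice comparison with a single leading-digit count followed by length and no-digit-in-suffix checks on the remaining slice.
import Mathlib
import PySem

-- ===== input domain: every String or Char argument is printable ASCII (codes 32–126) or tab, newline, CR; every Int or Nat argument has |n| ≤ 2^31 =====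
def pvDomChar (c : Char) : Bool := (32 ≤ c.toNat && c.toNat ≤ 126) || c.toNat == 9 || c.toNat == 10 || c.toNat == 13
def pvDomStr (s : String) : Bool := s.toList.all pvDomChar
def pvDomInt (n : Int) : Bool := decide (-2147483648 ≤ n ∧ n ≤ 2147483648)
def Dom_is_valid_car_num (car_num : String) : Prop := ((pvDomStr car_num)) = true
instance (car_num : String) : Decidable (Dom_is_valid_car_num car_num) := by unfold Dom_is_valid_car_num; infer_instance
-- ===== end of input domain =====

-- B replaces A's partition-then-compare-prefix logic by one leading-digit scan plus suffix checks (faster: avoids quadratic string building).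

-- ===== PORT A =====
-- A partitions the characters into digits and non-digits (appending, in order), then
-- compares car_num[:num_len] with the digit bucket and checks the length bounds.
-- s[:k] with 0 ≤ k is exactly List.take k on the characters.
def is_valid_car_num (car_num : String) : Bool :=
  let p := car_num.toList.foldl
    (fun (st : List Char × List Char) c =>
      if PySem.Chars.isdigit c then (st.1 ++ [c], st.2) else (st.1, st.2 ++ [c]))
    ([], [])
  let num_len := p.1.length
  let char_len := p.2.length
  if car_num.toList.take num_len ≠ p.1 then false
  else if num_len > 4 then false
  else if char_len > 3 then false
  else if char_len < 1 ∨ num_len < 1 then false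
  else true

-- ===== PORT B =====
-- B's while loop counts the leading digit characters (= takeWhile); rest = car_num[i:].
def is_valid_car_num_alt (car_num : String) : Bool :=
  let cs := car_num.toList
  let i := (cs.takeWhile PySem.Chars.isdigit).length
  let rest := cs.drop i
  decide (1 ≤ i) && decide (i ≤ 4) && decide (1 ≤ rest.length) && decide (rest.length ≤ 3)
    && !(rest.any PySem.Chars.isdigit)

-- ===== PRECONDITION & SPEC =====
def Spec_is_valid_car_num (car_num : String) (out : Bool) : Prop := out = is_valid_car_num_alt car_num
instance (car_num : String) (out : Bool) : Decidable (Spec_is_valid_car_num car_num out) := by unfold Spec_is_valid_car_num; infer_instance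

-- ===== CLAIM (what is proved, stated in full; the proofs are below) =====
def Claim_equal_is_valid_car_num : Prop := ∀ (car_num : String), Dom_is_valid_car_num car_num → Spec_is_valid_car_num car_num (is_valid_car_num car_num)

-- ===== LEMMAS AND PROOFS =====

-- A's fold computes the two filters.
theorem pv_fold_filter (p : Char → Bool) (cs d nd : List Char) :
    cs.foldl (fun (st : List Char × List Char) c =>
      if p c then (st.1 ++ [c], st.2) else (st.1, st.2 ++ [c])) (d, nd)
    = (d ++ cs.filter p, nd ++ cs.filter (fun c => !p c)) := by
  induction cs generalizing d nd with
  | nil => simp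
  | cons c cs ih =>
    by_cases h : p c <;> simp [h, ih]

theorem pv_len_filter_not (p : Char → Bool) (cs : List Char) :
    (cs.filter p).length + (cs.filter (fun c => !p c)).length = cs.length := by
  induction cs with
  | nil => simp
  | cons c cs ih => by_cases h : p c <;> simp [h] <;> omega

theorem pv_take_all_le_takeWhile (p : Char → Bool) (cs : List Char) (n : Nat)
    (hn : n ≤ cs.length) (hall : ∀ c ∈ cs.take n, p c) :
    n ≤ (cs.takeWhile p).length := by
  induction cs generalizing n with
  | nil => simpa using hn
  | cons c cs ih =>
    cases n with
    | zero => omega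
    | succ n =>
      have hc : p c := hall c (by simp)
      simp only [List.takeWhile_cons, hc, if_pos, List.length_cons]
      have := ih n (by simpa using hn) (fun x hx => hall x (by simp [hx]))
      omega

theorem pv_filter_split (p : Char → Bool) (cs : List Char) :
    cs.filter p = cs.takeWhile p ++ (cs.dropWhile p).filter p := by
  conv_lhs => rw [← List.takeWhile_append_dropWhile (p := p) (l := cs)]
  rw [List.filter_append, List.filter_eq_self.2 (fun a ha => List.mem_takeWhile_imp ha)]

theorem pv_take_takeWhile (p : Char → Bool) (cs : List Char) :
    cs.take (cs.takeWhile p).length = cs.takeWhile p := by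
  have h := List.takeWhile_prefix (p := p) (l := cs)
  exact (List.prefix_iff_eq_take.1 h).symm

-- ===== VERDICT (by name: the statement is the Claim_ definition above) =====
theorem is_valid_car_num_spec : Claim_equal_is_valid_car_num := by
  intro s _
  unfold Spec_is_valid_car_num is_valid_car_num is_valid_car_num_alt
  simp only [pv_fold_filter, List.nil_append]
  set cs := s.toList with hcs
  set p := PySem.Chars.isdigit with hp
  set tw := cs.takeWhile p with htw
  have hdrop : cs.drop tw.length = cs.dropWhile p := by
    conv_lhs => rw [← List.takeWhile_append_dropWhile (p := p) (l := cs)]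
    exact List.drop_left
  set dw := cs.dropWhile p with hdw
  have htd : tw.length + dw.length = cs.length := by
    rw [← List.length_append, htw, hdw, List.takeWhile_append_dropWhile]
  have hfil : cs.filter p = tw ++ dw.filter p := pv_filter_split p cs
  have hlen := pv_len_filter_not p cs
  rw [hdrop]
  by_cases hA : dw.any p = true
  · -- a digit occurs after the first non-digit: both sides are false
    obtain ⟨x, hx, hpx⟩ := List.any_eq_true.1 hA
    have hne : dw.filter p ≠ [] := by
      intro h0
      have := List.mem_filter.2 ⟨hx, hpx⟩
      rw [h0] at this; simp at this
    have hgt : tw.length < (cs.filter p).length := by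
      rw [hfil, List.length_append]
      have := List.length_pos_iff.2 hne
      omega
    have hcond : cs.take (cs.filter p).length ≠ cs.filter p := by
      intro heq
      have hall : ∀ c ∈ cs.take (cs.filter p).length, p c := by
        rw [heq]; exact fun c hc => (List.mem_filter.1 hc).2
      have := pv_take_all_le_takeWhile p cs (cs.filter p).length (by omega) hall
      rw [← htw] at this; omega
    simp [hcond, hA]
  · -- no digit in the suffix: A's prefix test passes and both check the same bounds
    have hA' : dw.any p = false := by simpa using hA
    have hnil : dw.filter p = [] := by
      rw [List.filter_eq_nil_iff]
      intro a ha
      have := List.any_eq_false.1 hA' a ha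
      simpa using this
    have hfil' : cs.filter p = tw := by rw [hfil, hnil, List.append_nil]
    have hclen : (cs.filter (fun c => !p c)).length = dw.length := by
      rw [hfil'] at hlen; omega
    rw [hfil', pv_take_takeWhile, hclen, hA']
    split_ifs with h1 h2 h3 h4
    · exact absurd htw.symm h1
    · simp; omega
    · simp; omega
    · simp; omega
    · simp; omega
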